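-- pv_equiv track=rewrite | github.com/ericmerle3789/Collatz-Junction-Theorem | research_log/R171_MITM_k22.py | generate_monotone_sequences
-- ===== SOURCE A (Python) =====
-- def generate_monotone_sequences(length, max_val):
--     """
--     Genere toutes les sequences monotones (v_0, ..., v_{length-1})
--     avec 0 <= v_0 <= v_1 <= ... <= v_{length-1} <= max_val.
--     """
--     if length == 0:
--         yield ()
--         return
--     if length == 1:
--         for v in range(max_val + 1):
--             yield (v,)
--         return
--
--     def _gen(depth, lower, acc):
--         if depth == length:
--             yield tuple(acc)
--             return
--         for v in range(lower, max_val + 1):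
--             acc.append(v)
--             yield from _gen(depth + 1, v, acc)
--             acc.pop()
--
--     yield from _gen(0, 0, [])
-- ===== SOURCE B (Python) =====
-- def generate_monotone_sequences(length, max_val):
--     """
--     Genere toutes les sequences monotones (v_0, ..., v_{length-1})
--     avec 0 <= v_0 <= v_1 <= ... <= v_{length-1} <= max_val.
--     Breadth-first: grow the whole list of prefixes one position at a time.
--     """
--     if length < 0:
--         return
--     prefixes = [()]
--     for _ in range(length):
--         prefixes = [p + (v,)
--                     for p in prefixes
--                     for v in range(p[-1] if p else 0, max_val + 1)]
--         if not prefixes: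
--             return
--     yield from prefixes
-- ===== Notes on version B (the rewrite author's own statement) =====
-- stated objective: alternative
-- what changed: Replaces the recursive depth-first generator (_gen with a mutable accumulator and length 0/1 special cases) by a single breadth-first loop that rebuilds the whole list of prefixes one position at a time; no recursion, no special cases.
import Mathlib
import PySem

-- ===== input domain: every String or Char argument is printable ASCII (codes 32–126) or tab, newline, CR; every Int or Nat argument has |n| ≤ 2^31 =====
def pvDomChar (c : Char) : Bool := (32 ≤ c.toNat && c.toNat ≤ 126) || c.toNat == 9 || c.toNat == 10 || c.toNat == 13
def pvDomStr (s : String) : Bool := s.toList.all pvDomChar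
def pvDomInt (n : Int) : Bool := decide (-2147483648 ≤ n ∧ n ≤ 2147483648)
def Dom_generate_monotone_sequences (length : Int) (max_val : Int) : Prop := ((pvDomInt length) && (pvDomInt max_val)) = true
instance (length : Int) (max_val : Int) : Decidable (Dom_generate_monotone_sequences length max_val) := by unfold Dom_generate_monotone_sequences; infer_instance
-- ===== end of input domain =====

-- B replaces A's recursive depth-first generator by a breadth-first loop that regrows the
-- whole list of prefixes one position at a time (objective: alternative, same cost).
-- Both ports collect the lazily yielded tuples into a list (return value only; no mutation observable).

-- ===== PORT A =====
-- _gen(depth, lower, acc): recursion counted by remaining = length - depth (a Nat);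
-- depth == length is exactly remaining = 0.
def pvGenA (max_val : Int) : Nat → Int → List Int → List (List Int)
  | 0, _, acc => [acc]
  | n+1, lower, acc =>
      (PySem.List.pyRange lower (max_val + 1) 1).flatMap
        (fun v => pvGenA max_val n v (acc ++ [v]))

def generate_monotone_sequences (length : Int) (max_val : Int) : List (List Int) :=
  if length = 0 then [[]]
  else if length = 1 then (PySem.List.pyRange 0 (max_val + 1) 1).map (fun v => [v])
  else if length < 0 then []
    -- totality guard: for negative length Python's 'depth == length' never fires; inside
    -- Pre_ (max_val < 0) every range(lower, max_val+1) with lower ≥ 0 is empty, so nothing is yielded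
  else pvGenA max_val length.toNat 0 []

-- ===== PORT B =====
-- one pass of the comprehension: prefixes = [p + (v,) for p in prefixes for v in range(p[-1] if p else 0, max_val+1)]
def pvAltStep (max_val : Int) (prefixes : List (List Int)) : List (List Int) :=
  prefixes.flatMap (fun p =>
    (PySem.List.pyRange (p.getLast?.getD 0) (max_val + 1) 1).map (fun v => p ++ [v]))

-- the loop over range(length), with the early 'if not prefixes: return' exit
def pvAltLoop (max_val : Int) : Nat → List (List Int) → List (List Int)
  | 0, ps => ps
  | n+1, ps =>
      let ps' := pvAltStep max_val ps
      if ps' = [] then [] else pvAltLoop max_val n ps'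

def generate_monotone_sequences_alt (length : Int) (max_val : Int) : List (List Int) :=
  if length < 0 then []
  else pvAltLoop max_val length.toNat [[]]

-- ===== PRECONDITION & SPEC =====
-- Pre_ excludes exactly the inputs on which A raises (RecursionError): length < 0 with
-- max_val ≥ 0, where _gen recurses forever because depth never equals the negative length.
def Pre_generate_monotone_sequences (length : Int) (max_val : Int) : Prop :=
  0 ≤ length ∨ max_val < 0
instance (length : Int) (max_val : Int) : Decidable (Pre_generate_monotone_sequences length max_val) := by unfold Pre_generate_monotone_sequences; infer_instance

def pvWitness_generate_monotone_sequences : Int × Int := (2, 1)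

def Spec_generate_monotone_sequences (length : Int) (max_val : Int) (out : List (List Int)) : Prop := out = generate_monotone_sequences_alt length max_val
instance (length : Int) (max_val : Int) (out : List (List Int)) : Decidable (Spec_generate_monotone_sequences length max_val out) := by unfold Spec_generate_monotone_sequences; infer_instance

-- ===== CLAIM (what is proved, stated in full; the proofs are below) =====
def Claim_equal_generate_monotone_sequences : Prop := ∀ (length : Int) (max_val : Int), Dom_generate_monotone_sequences length max_val → Pre_generate_monotone_sequences length max_val → Spec_generate_monotone_sequences length max_val (generate_monotone_sequences length max_val)


-- ===== LEMMAS AND PROOFS =====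

-- iterating one comprehension pass distributes over the prefixes: each prefix evolves independently
lemma pvAltStep_iterate_flatMap (mv : Int) (n : Nat) (l : List (List Int)) :
    (pvAltStep mv)^[n] l = l.flatMap (fun p => (pvAltStep mv)^[n] [p]) := by
  induction n generalizing l with
  | zero => simp
  | succ n ih =>
    rw [Function.iterate_succ_apply, ih (pvAltStep mv l)]
    have hsingle : ∀ p : List Int, (pvAltStep mv)^[n+1] [p]
        = (pvAltStep mv [p]).flatMap (fun q => (pvAltStep mv)^[n] [q]) := by
      intro p; rw [Function.iterate_succ_apply, ih (pvAltStep mv [p])]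
    simp only [hsingle]
    have hstep : pvAltStep mv l = l.flatMap (fun p => pvAltStep mv [p]) := by
      simp [pvAltStep]
    rw [hstep, List.flatMap_assoc]

-- A's recursion with accumulator acc (whose last element is its lower bound) computes
-- n further breadth-first passes starting from the single prefix acc
lemma pvGenA_eq_iterate (mv : Int) (n : Nat) (acc : List Int) :
    pvGenA mv n (acc.getLast?.getD 0) acc = (pvAltStep mv)^[n] [acc] := by
  induction n generalizing acc with
  | zero => simp [pvGenA]
  | succ n ih =>
    rw [Function.iterate_succ_apply]
    have hstep : pvAltStep mv [acc]
        = (PySem.List.pyRange (acc.getLast?.getD 0) (mv + 1) 1).map (fun v => acc ++ [v]) := by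
      simp [pvAltStep]
    rw [hstep, pvAltStep_iterate_flatMap, List.flatMap_map]
    show pvGenA mv (n+1) (acc.getLast?.getD 0) acc = _
    rw [pvGenA]
    apply List.flatMap_congr
    intro v _
    have hlast : ((acc ++ [v]).getLast?.getD 0) = v := by simp
    have h := ih (acc ++ [v])
    rwa [hlast] at h

lemma pvAltLoop_eq_iterate (mv : Int) (n : Nat) (ps : List (List Int)) :
    pvAltLoop mv n ps = (pvAltStep mv)^[n] ps := by
  induction n generalizing ps with
  | zero => simp [pvAltLoop]
  | succ n ih =>
    rw [pvAltLoop, Function.iterate_succ_apply]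
    by_cases h : pvAltStep mv ps = []
    · rw [if_pos h, h, Function.iterate_fixed (by simp [pvAltStep])]
    · rw [if_neg h, ih]

-- ===== VERDICT (by name: the statement is the Claim_ definition above) =====
theorem generate_monotone_sequences_spec : Claim_equal_generate_monotone_sequences := by
  intro length max_val _ _
  unfold Spec_generate_monotone_sequences
  unfold generate_monotone_sequences generate_monotone_sequences_alt
  have hbase : pvGenA max_val length.toNat 0 []
      = (pvAltStep max_val)^[length.toNat] [[]] := by
    have := pvGenA_eq_iterate max_val length.toNat []
    simpa using this
  rw [pvAltLoop_eq_iterate]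
  by_cases hneg : length < 0
  · rw [if_neg (show ¬length = 0 by omega), if_neg (show ¬length = 1 by omega),
        if_pos hneg, if_pos hneg]
  · rw [if_neg hneg, if_neg hneg]
    by_cases h0 : length = 0
    · subst h0; simp
    by_cases h1 : length = 1
    · subst h1
      rw [if_neg h0, if_pos rfl]
      have h1' : ((1:Int).toNat) = 1 := rfl
      rw [h1', Function.iterate_one]
      simp [pvAltStep]
    · rw [if_neg h0, if_neg h1]
      exact hbase
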